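-- pv_equiv track=rewrite | github.com/SamInMotion/Medical-intervention-text-classification | src/auto_mesh.py | lookup_mesh_in_text
-- ===== SOURCE A (Python) =====
-- from typing import Dict, List, Set
--
-- def lookup_mesh_in_text(
--     text: str,
--     mesh_vocab: Set[str],
-- ) -> List[str]:
--     """Find MeSH terms that appear as substrings in the text.
--
--     Case-insensitive matching. Returns the matched terms in their
--     original (lowercase) form from the vocabulary.
--
--     This is the automatic analog of expert MeSH assignment:
--     mechanical string matching without contextual judgment.
--     """
--     text_lower = text.lower()
--     matched = []
--     for term in mesh_vocab:
--         if term in text_lower: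
--             matched.append(term)
--     return matched
-- ===== SOURCE B (Python) =====
-- def lookup_mesh_in_text(text, mesh_vocab):
--     """Text-driven scan: hash every window of each needed length once,
--     then emit vocab terms (in vocab order) that occurred as a window."""
--     text_lower = text.lower()
--     n = len(text_lower)
--     windows = set()
--     for L in set(map(len, mesh_vocab)):
--         windows.update(text_lower[i:i + L] for i in range(n - L + 1))
--     return [term for term in mesh_vocab if term in windows]
-- ===== Notes on version B (the rewrite author's own statement) =====
-- stated objective: faster
-- what changed: Instead of testing each vocab term against the text with its own substring search (one text scan per term), B scans the lowered text once per distinct term length, hashing every window of that length into a set, then emits the vocab terms (in vocab order) found in that set.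
import Mathlib
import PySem

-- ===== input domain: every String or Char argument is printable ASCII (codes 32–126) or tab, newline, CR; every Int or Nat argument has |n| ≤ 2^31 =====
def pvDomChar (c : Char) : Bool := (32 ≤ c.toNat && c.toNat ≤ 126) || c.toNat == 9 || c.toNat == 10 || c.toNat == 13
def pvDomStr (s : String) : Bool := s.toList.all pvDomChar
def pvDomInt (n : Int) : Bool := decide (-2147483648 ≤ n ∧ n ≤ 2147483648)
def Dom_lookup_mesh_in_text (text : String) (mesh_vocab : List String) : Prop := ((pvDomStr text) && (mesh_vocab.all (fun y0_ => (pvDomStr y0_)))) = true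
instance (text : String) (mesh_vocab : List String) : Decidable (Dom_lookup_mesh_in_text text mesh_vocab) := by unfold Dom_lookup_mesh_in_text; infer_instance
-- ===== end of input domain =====

-- B replaces A's per-term substring scan by a single text-driven pass: it hashes every
-- window of each needed (distinct) length into a set once, then emits vocab terms found there.

-- ===== PORT A =====
def lookup_mesh_in_text (text : String) (mesh_vocab : List String) : List String :=
  let text_lower := PySem.Str.lower text
  mesh_vocab.foldl
    (fun matched term =>
      if PySem.Str.isIn term text_lower then matched ++ [term] else matched) []

-- ===== PORT B =====
def lookup_mesh_in_text_alt (text : String) (mesh_vocab : List String) : List String :=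
  let text_lower := PySem.Str.lower text
  let n := PySem.Str.len text_lower
  let windows : PySem.Set String :=
    (PySem.Set.ofList (mesh_vocab.map PySem.Str.len)).foldl
      (fun ws L => PySem.Set.update ws
        ((PySem.List.pyRange 0 (n - L + 1) 1).map
          (fun i => PySem.Str.slice text_lower (some i) (some (i + L)))))
      PySem.Set.empty
  mesh_vocab.filter (fun term => PySem.Set.contains windows term)

-- ===== PRECONDITION & SPEC =====
def Spec_lookup_mesh_in_text (text : String) (mesh_vocab : List String) (out : List String) : Prop := out = lookup_mesh_in_text_alt text mesh_vocab
instance (text : String) (mesh_vocab : List String) (out : List String) : Decidable (Spec_lookup_mesh_in_text text mesh_vocab out) := by unfold Spec_lookup_mesh_in_text; infer_instance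

-- ===== CLAIM (what is proved, stated in full; the proofs are below) =====
def Claim_equal_lookup_mesh_in_text : Prop := ∀ (text : String) (mesh_vocab : List String), Dom_lookup_mesh_in_text text mesh_vocab → Spec_lookup_mesh_in_text text mesh_vocab (lookup_mesh_in_text text mesh_vocab)

-- ===== LEMMAS AND PROOFS =====

-- membership in a fold of Set.update: the union of the generated batches
theorem mem_foldl_update {α β : Type} [BEq α] [LawfulBEq α]
    (xs : List β) (g : β → List α) (s : PySem.Set α) (y : α) :
    y ∈ xs.foldl (fun ws L => PySem.Set.update ws (g L)) s ↔ y ∈ s ∨ ∃ L ∈ xs, y ∈ g L := by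
  induction xs generalizing s with
  | nil => simp
  | cons x xs ih =>
    simp only [List.foldl_cons, ih, PySem.Set.mem_update, List.mem_cons]
    constructor
    · rintro ((h | h) | ⟨L, hL, h⟩)
      · exact Or.inl h
      · exact Or.inr ⟨x, Or.inl rfl, h⟩
      · exact Or.inr ⟨L, Or.inr hL, h⟩
    · rintro (h | ⟨L, (rfl | hL), h⟩)
      · exact Or.inl (Or.inl h)
      · exact Or.inl (Or.inr h)
      · exact Or.inr ⟨L, hL, h⟩

-- a term of the vocabulary is in B's window set iff Python's 'term in text_lower'
theorem mem_windows_iff (tl term : String) (mesh_vocab : List String)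
    (hmem : term ∈ mesh_vocab) :
    (term ∈ (PySem.Set.ofList (mesh_vocab.map PySem.Str.len)).foldl
      (fun ws L => PySem.Set.update ws
        ((PySem.List.pyRange 0 (PySem.Str.len tl - L + 1) 1).map
          (fun i => PySem.Str.slice tl (some i) (some (i + L)))))
      PySem.Set.empty) ↔ PySem.Str.isIn term tl = true := by
  rw [mem_foldl_update]
  constructor
  · rintro (h | ⟨L, hL, h⟩)
    · simp [PySem.Set.empty] at h
    · simp only [List.mem_map] at h
      obtain ⟨i, hi, hslice⟩ := h
      rw [PySem.List.mem_pyRange_one] at hi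
      have h0 : (0:Int) ≤ i := hi.1
      have hLnn : (0:Int) ≤ L := by
        rw [PySem.Set.mem_ofList, List.mem_map] at hL
        obtain ⟨t', _, rfl⟩ := hL
        rw [PySem.Str.len_eq]; positivity
      have htl : term.toList = (tl.toList.drop i.toNat).take ((i + L).toNat - i.toNat) := by
        rw [← hslice, PySem.Str.toList_slice, PySem.Chars.slice_eq_listSlice,
          PySem.List.slice_toNat _ h0 (by omega)]
      rw [PySem.Str.isIn_eq, ← PySem.Chars.exists_prefix_drop_iff_isIn]
      exact ⟨i.toNat, htl ▸ List.take_prefix _ _⟩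
  · intro h
    rw [PySem.Str.isIn_iff_infix] at h
    obtain ⟨pre, suf, hs⟩ := h
    have hlen : pre.length + term.toList.length + suf.length = tl.toList.length := by
      rw [← hs]; simp [Nat.add_assoc]
    refine Or.inr ⟨PySem.Str.len term, ?_, ?_⟩
    · rw [PySem.Set.mem_ofList, List.mem_map]
      exact ⟨term, hmem, rfl⟩
    · rw [List.mem_map]
      refine ⟨(pre.length : Int), ?_, ?_⟩
      · rw [PySem.List.mem_pyRange_one, PySem.Str.len_eq, PySem.Str.len_eq]
        constructor
        · positivity
        · omega
      · apply String.toList_inj.mp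
        rw [PySem.Str.toList_slice, PySem.Chars.slice_eq_listSlice, PySem.Str.len_eq,
          PySem.List.slice_toNat _ (by positivity) (by positivity)]
        rw [← hs, List.append_assoc]
        have h1 : ((pre.length : Int)).toNat = pre.length := Int.toNat_natCast _
        have h2 : ((pre.length : Int) + (term.toList.length : Int)).toNat
            = pre.length + term.toList.length := by omega
        rw [h1, h2, List.drop_left, Nat.add_sub_cancel_left, List.take_left]

-- ===== VERDICT (by name: the statement is the Claim_ definition above) =====
theorem lookup_mesh_in_text_spec : Claim_equal_lookup_mesh_in_text := by
  intro text mesh_vocab _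
  unfold Spec_lookup_mesh_in_text lookup_mesh_in_text lookup_mesh_in_text_alt
  simp only []
  rw [PySem.List.foldl_append_if_eq_filter, List.nil_append]
  apply List.filter_congr
  intro term hterm
  rw [Bool.eq_iff_iff, PySem.Set.contains_iff]
  exact (mem_windows_iff (PySem.Str.lower text) term mesh_vocab hterm).symm
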